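-- pv_equiv track=rewrite | github.com/LWHSTechnicalArts/codeForSoundPythonChallenge | harmony/harmony_analyzer_brute_force.py | active_pitch_classes_brute
-- ===== SOURCE A (Python) =====
-- def active_pitch_classes_brute(key_numbers, window_size):
--     '''
--     Brute-force method to find active pitch classes in the last window_size key numbers.
--     '''
--     result = []
--     for i in range(len(key_numbers)):
--         # Get the lookback window ending at position i.
--         start = max(0, i - window_size + 1)
--         window = key_numbers[start:i+1]
--
--         # Find the unique pitch classes in the window notes.
--         pitch_classes = set()
--         for key_number in window:
--             pitch_class = key_number % 12
--             pitch_classes.add(pitch_class)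
--
--         result.append(pitch_classes.copy())
--
--     return result
-- ===== SOURCE B (Python) =====
-- from collections import deque
--
--
-- def active_pitch_classes_brute(key_numbers, window_size):
--     '''
--     Incremental sliding window: keep a deque of the pitch classes currently in
--     the window and emit its distinct elements at each position.
--     '''
--     result = []
--     window = deque()
--     for key_number in key_numbers:
--         window.append(key_number % 12)
--         if len(window) > window_size:
--             window.popleft()
--         result.append(set(window))
--     return result
-- ===== Notes on version B (the rewrite author's own statement) =====
-- stated objective: simpler
-- what changed: Instead of recomputing the window by index arithmetic and slicing and rebuilding the pitch-class set element by element at each position, B maintains the window incrementally in a deque of pitch classes (mod taken once per element, popping the expired element) and emits set(window) per step.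
import Mathlib
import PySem

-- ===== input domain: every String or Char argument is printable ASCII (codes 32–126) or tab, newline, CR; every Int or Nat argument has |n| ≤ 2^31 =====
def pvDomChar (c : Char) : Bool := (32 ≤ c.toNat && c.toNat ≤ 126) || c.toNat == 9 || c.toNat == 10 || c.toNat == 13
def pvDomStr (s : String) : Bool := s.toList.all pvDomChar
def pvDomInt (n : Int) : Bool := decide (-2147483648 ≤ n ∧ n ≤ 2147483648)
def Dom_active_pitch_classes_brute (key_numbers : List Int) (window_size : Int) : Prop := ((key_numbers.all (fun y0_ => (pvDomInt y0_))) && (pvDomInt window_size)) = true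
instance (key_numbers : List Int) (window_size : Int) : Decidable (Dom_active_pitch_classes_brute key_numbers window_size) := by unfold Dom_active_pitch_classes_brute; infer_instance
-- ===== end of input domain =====

-- B maintains the sliding window incrementally in a deque of pitch classes instead of
-- re-slicing and rebuilding the set per position; same cost class, simpler code.

-- ===== PORT A =====
def active_pitch_classes_brute (key_numbers : List Int) (window_size : Int) : List (List Int) :=
  (PySem.List.pyRange 0 (PySem.List.len key_numbers) 1).foldl (fun result i =>
    let start := max 0 (i - window_size + 1)
    let window := PySem.List.slice key_numbers (some start) (some (i + 1))
    let pitch_classes := window.foldl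
      (fun s key_number => PySem.Set.add s (PySem.Int.mod key_number 12)) PySem.Set.empty
    result ++ [pitch_classes]) []

-- ===== PORT B =====
-- window.append(key_number % 12); if len(window) > window_size: window.popleft()
def pvStepB (window_size : Int) (window : List Int) (key_number : Int) : List Int :=
  let w1 := window ++ [PySem.Int.mod key_number 12]
  if ((w1.length : Int) > window_size) then w1.drop 1 else w1

-- the 'for key_number in key_numbers' loop, emitting set(window) each step
def pvLoopB (window_size : Int) (window : List Int) : List Int → List (List Int)
  | [] => []
  | key_number :: rest =>
    let w2 := pvStepB window_size window key_number
    PySem.Set.ofList w2 :: pvLoopB window_size w2 rest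

def active_pitch_classes_brute_alt (key_numbers : List Int) (window_size : Int) : List (List Int) :=
  pvLoopB window_size [] key_numbers

-- ===== PRECONDITION & SPEC =====
def Spec_active_pitch_classes_brute (key_numbers : List Int) (window_size : Int) (out : List (List Int)) : Prop := out = active_pitch_classes_brute_alt key_numbers window_size
instance (key_numbers : List Int) (window_size : Int) (out : List (List Int)) : Decidable (Spec_active_pitch_classes_brute key_numbers window_size out) := by unfold Spec_active_pitch_classes_brute; infer_instance

-- ===== CLAIM (what is proved, stated in full; the proofs are below) =====
def Claim_equal_active_pitch_classes_brute : Prop := ∀ (key_numbers : List Int) (window_size : Int), Dom_active_pitch_classes_brute key_numbers window_size → Spec_active_pitch_classes_brute key_numbers window_size (active_pitch_classes_brute key_numbers window_size)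

-- ===== LEMMAS AND PROOFS =====

def pvPc (k : Int) : Int := PySem.Int.mod k 12

-- the window contents after processing the first n elements
def pvW (ks : List Int) (ws : Int) (n : Nat) : List Int :=
  ((ks.take n).drop (n - ws.toNat)).map pvPc

theorem pvW_append (ks : List Int) (ws : Int) (n : Nat) (hn : n < ks.length) :
    pvW ks ws n ++ [PySem.Int.mod (ks.getD n 0) 12] =
      ((ks.take (n + 1)).drop (n - ws.toNat)).map pvPc := by
  unfold pvW
  rw [List.take_add_one, List.getElem?_eq_getElem hn]
  rw [List.drop_append_of_le_length (by simp; omega)]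
  rw [List.map_append]
  congr 1
  simp [pvPc, PySem.Int.mod, List.getD_eq_getElem?_getD, List.getElem?_eq_getElem hn]

theorem pvStepB_eq (ks : List Int) (ws : Int) (n : Nat) (hn : n < ks.length) :
    pvStepB ws (pvW ks ws n) (ks.getD n 0) = pvW ks ws (n + 1) := by
  show (if (((pvW ks ws n ++ [PySem.Int.mod (ks.getD n 0) 12]).length : Int) > ws)
      then (pvW ks ws n ++ [PySem.Int.mod (ks.getD n 0) 12]).drop 1
      else pvW ks ws n ++ [PySem.Int.mod (ks.getD n 0) 12]) = pvW ks ws (n + 1)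
  rw [pvW_append ks ws n hn]
  have hlen : (((ks.take (n + 1)).drop (n - ws.toNat)).map pvPc).length
      = (n + 1) - (n - ws.toNat) := by
    simp; omega
  by_cases hc : ((((ks.take (n + 1)).drop (n - ws.toNat)).map pvPc).length : Int) > ws
  · rw [if_pos hc]
    unfold pvW
    rw [← List.map_drop, List.drop_drop]
    have : n - ws.toNat + 1 = (n + 1) - ws.toNat := by
      rw [hlen] at hc
      omega
    rw [this]
  · rw [if_neg hc]
    unfold pvW
    rw [hlen] at hc
    have : n - ws.toNat = (n + 1) - ws.toNat := by omega
    rw [this]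

theorem pvLoopB_spec (ks : List Int) (ws : Int) :
    ∀ (rest : List Int) (n : Nat), ks.drop n = rest →
      pvLoopB ws (pvW ks ws n) rest =
        (List.range' n rest.length).map (fun i => PySem.Set.ofList (pvW ks ws (i + 1))) := by
  intro rest
  induction rest with
  | nil => intro n _; simp [pvLoopB]
  | cons k rest ih =>
    intro n hdrop
    have hn : n < ks.length := by
      by_contra h
      rw [List.drop_eq_nil_of_le (by omega)] at hdrop
      simp at hdrop
    have hk : ks.getD n 0 = k := by
      rw [List.getD_eq_getElem?_getD, List.getElem?_eq_getElem hn]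
      have hh : (ks.drop n).head? = some k := by rw [hdrop]; rfl
      rw [List.head?_drop, List.getElem?_eq_getElem hn] at hh
      simpa using hh
    have hrest : ks.drop (n + 1) = rest := by
      have : (ks.drop n).tail = rest := by rw [hdrop]; rfl
      rwa [List.tail_drop] at this
    simp only [pvLoopB, List.length_cons, List.range'_succ, List.map_cons]
    rw [← hk, pvStepB_eq ks ws n hn, ih (n + 1) hrest]

-- A's window slice equals the incrementally maintained window positions
theorem pvSlice_eq (ks : List Int) (ws : Int) (i : Nat) :
    PySem.List.slice ks (some (max 0 ((i : Int) - ws + 1))) (some ((i : Int) + 1)) =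
      (ks.take (i + 1)).drop ((i + 1) - ws.toNat) := by
  rw [PySem.List.slice_toNat ks (le_max_left _ _) (by omega)]
  rw [List.drop_take]
  rcases le_or_gt ws 0 with hws | hws
  · have h1 : (i + 1) - ((i : Int) + 1).toNat = 0 := by omega
    have h2 : ((i : Int) + 1).toNat - (max 0 ((i : Int) - ws + 1)).toNat = 0 := by omega
    have h3 : (i + 1) - ((i + 1) - ws.toNat) = 0 := by omega
    rw [h2, h3]
    simp
  · have h1 : (max 0 ((i : Int) - ws + 1)).toNat = (i + 1) - ws.toNat := by omega
    have h2 : ((i : Int) + 1).toNat = i + 1 := by omega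
    rw [h1, h2]

theorem pvA_eq (ks : List Int) (ws : Int) :
    active_pitch_classes_brute ks ws =
      (List.range ks.length).map (fun i => PySem.Set.ofList (pvW ks ws (i + 1))) := by
  unfold active_pitch_classes_brute
  rw [PySem.List.foldl_append_singleton_eq_map]
  have hr : PySem.List.pyRange 0 (PySem.List.len ks) 1 =
      (List.range ks.length).map (fun k : Nat => (k : Int)) := by
    rw [PySem.List.pyRange_one]
    simp [PySem.List.len_eq]
  rw [List.nil_append, hr, List.map_map]
  apply List.map_congr_left
  intro i _
  simp only [Function.comp]
  rw [← PySem.Set.update_map_eq_foldl_add _ (fun k => PySem.Int.mod k 12) PySem.Set.empty]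
  have hupd : ∀ xs : List Int, PySem.Set.update PySem.Set.empty xs = PySem.Set.ofList xs :=
    fun xs => PySem.Set.update_nil_left xs
  rw [hupd, pvSlice_eq ks ws i]
  rfl

-- ===== VERDICT (by name: the statement is the Claim_ definition above) =====
theorem active_pitch_classes_brute_spec : Claim_equal_active_pitch_classes_brute := by
  intro ks ws _
  unfold Spec_active_pitch_classes_brute active_pitch_classes_brute_alt
  rw [pvA_eq]
  have h0 : pvW ks ws 0 = [] := by simp [pvW]
  rw [List.range_eq_range', ← h0]
  exact (pvLoopB_spec ks ws ks 0 rfl).symm
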